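-- pv_equiv track=rewrite | github.com/Favo02/advent-of-code | 2024/day21/day21_part1_original.py | valid_nums
-- ===== SOURCE A (Python) =====
-- MOVE = {
--   ">": (1, 0),
--   "<": (-1, 0),
--   "v": (0, 1),
--   "^": (0, -1),
-- }
--
-- def valid_nums(x, y, path):
--   for p in path:
--     x += MOVE[p][0]
--     y += MOVE[p][1]
--     if not (0 <= x < 3): return False
--     if not (0 <= y < 4): return False
--     if (x, y) == (0, 3): return False
--   return True
-- ===== SOURCE B (Python) =====
-- MOVE = {
--   ">": (1, 0),
--   "<": (-1, 0),
--   "v": (0, 1),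
--   "^": (0, -1),
-- }
--
-- def valid_nums(x, y, path):
--   # two-phase: build the list of visited positions, then validate them all
--   positions = []
--   for p in path:
--     dx, dy = MOVE[p]
--     x, y = x + dx, y + dy
--     positions.append((x, y))
--   return all(0 <= px < 3 and 0 <= py < 4 and (px, py) != (0, 3)
--              for px, py in positions)
-- ===== Notes on version B (the rewrite author's own statement) =====
-- stated objective: alternative
-- what changed: A fuses update and bounds-check in one early-returning loop; B first builds the full list of visited positions by accumulating the move deltas, then validates all of them in a separate pass with all(...).
-- outside the precondition, e.g. on valid_nums(-30, 4, '^1>z'): A returns False, B raises KeyError; on valid_nums(0, 0, 'x'): A raises KeyError, B raises KeyError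
import Mathlib
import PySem

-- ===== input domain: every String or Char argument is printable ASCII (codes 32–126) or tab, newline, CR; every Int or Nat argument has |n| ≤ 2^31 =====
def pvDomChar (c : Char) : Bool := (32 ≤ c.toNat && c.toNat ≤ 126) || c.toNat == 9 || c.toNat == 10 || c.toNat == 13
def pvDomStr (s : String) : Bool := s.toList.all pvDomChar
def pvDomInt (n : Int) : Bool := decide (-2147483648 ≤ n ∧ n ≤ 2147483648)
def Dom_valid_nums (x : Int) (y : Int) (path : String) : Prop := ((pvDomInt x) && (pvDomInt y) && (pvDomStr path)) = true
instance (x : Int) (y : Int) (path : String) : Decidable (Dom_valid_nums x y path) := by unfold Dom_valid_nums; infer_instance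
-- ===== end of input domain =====

-- B builds the full list of visited positions first, then validates them all in a
-- second pass (alternative decomposition; A fuses update and check in one early-returning loop).

-- ===== PORT A =====
def MOVE : PySem.Dict Char (Int × Int) := PySem.Dict.mk
  [('>', (1, 0)), ('<', (-1, 0)), ('v', (0, 1)), ('^', (0, -1))]

-- A's fused loop: step, then three early-return checks; KeyError (lookup none) excluded by Pre_
def validLoop : Int → Int → List Char → Bool
  | _, _, [] => true
  | x, y, p :: rest =>
    match PySem.Dict.get? MOVE p with
    | none => false  -- Python raises KeyError here; Pre_valid_nums excludes it
    | some (dx, dy) =>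
      let x' := x + dx
      let y' := y + dy
      if ¬ (0 ≤ x' ∧ x' < 3) then false
      else if ¬ (0 ≤ y' ∧ y' < 4) then false
      else if (x', y') = ((0 : Int), (3 : Int)) then false
      else validLoop x' y' rest

def valid_nums (x : Int) (y : Int) (path : String) : Bool :=
  validLoop x y path.toList

-- ===== PORT B =====
-- phase 1: accumulate the visited positions (start excluded)
def posList : Int → Int → List Char → List (Int × Int)
  | _, _, [] => []
  | x, y, p :: rest =>
    match PySem.Dict.get? MOVE p with
    | none => []  -- Python raises KeyError here; Pre_valid_nums excludes it
    | some (dx, dy) => (x + dx, y + dy) :: posList (x + dx) (y + dy) rest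

-- phase 2: validate every position
def okPos (p : Int × Int) : Bool :=
  decide (0 ≤ p.1 ∧ p.1 < 3) && decide (0 ≤ p.2 ∧ p.2 < 4) && !(decide (p = ((0 : Int), (3 : Int))))

def valid_nums_alt (x : Int) (y : Int) (path : String) : Bool :=
  (posList x y path.toList).all okPos

-- ===== PRECONDITION & SPEC =====
-- Pre_ excludes paths containing a character not in MOVE: there A raises KeyError, or (if an
-- earlier move already left the keypad) returns False by short-circuit while B, which builds
-- all positions first, raises KeyError.
def Pre_valid_nums (x : Int) (y : Int) (path : String) : Prop :=
  (path.toList.all (fun c => c == '>' || c == '<' || c == 'v' || c == '^')) = true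
instance (x : Int) (y : Int) (path : String) : Decidable (Pre_valid_nums x y path) := by unfold Pre_valid_nums; infer_instance

def pvWitness_valid_nums : Int × Int × String := (2, 3, "^<v>")

def Spec_valid_nums (x : Int) (y : Int) (path : String) (out : Bool) : Prop := out = valid_nums_alt x y path
instance (x : Int) (y : Int) (path : String) (out : Bool) : Decidable (Spec_valid_nums x y path out) := by unfold Spec_valid_nums; infer_instance

-- ===== CLAIM (what is proved, stated in full; the proofs are below) =====
def Claim_equal_valid_nums : Prop := ∀ (x : Int) (y : Int) (path : String), Dom_valid_nums x y path → Pre_valid_nums x y path → Spec_valid_nums x y path (valid_nums x y path)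

-- ===== LEMMAS AND PROOFS =====
theorem validLoop_eq_all (l : List Char) :
    ∀ (x y : Int), (l.all (fun c => c == '>' || c == '<' || c == 'v' || c == '^')) = true →
      validLoop x y l = (posList x y l).all okPos := by
  induction l with
  | nil => intro x y _; rfl
  | cons p rest ih =>
    intro x y h
    simp only [List.all_cons, Bool.and_eq_true] at h
    obtain ⟨hp, hrest⟩ := h
    have hm : (PySem.Dict.get? MOVE p).isSome := by
      simp only [Bool.or_eq_true, beq_iff_eq] at hp
      rcases hp with ((h | h) | h) | h <;> subst h <;> decide
    obtain ⟨⟨dx, dy⟩, hsome⟩ := Option.isSome_iff_exists.mp hm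
    simp only [validLoop, posList, hsome, List.all_cons]
    by_cases h1 : (0 ≤ x + dx ∧ x + dx < 3)
    · by_cases h2 : (0 ≤ y + dy ∧ y + dy < 4)
      · by_cases h3 : ((x + dx, y + dy) = ((0 : Int), (3 : Int)))
        · simp [h1, h2, h3, okPos]
        · simp only [h1, h2, h3, not_true_eq_false, if_false, if_true]
          rw [ih _ _ hrest]
          simp [okPos, h1, h2, h3]
      · simp [h1, h2, okPos]
    · simp [h1, okPos]

-- ===== VERDICT (by name: the statement is the Claim_ definition above) =====
theorem valid_nums_spec : Claim_equal_valid_nums := by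
  intro x y path _ hpre
  unfold Spec_valid_nums valid_nums valid_nums_alt
  exact validLoop_eq_all path.toList x y hpre
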